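-- pv_equiv track=rewrite | github.com/CzerwinskiMarcin/AdventOfCode2023 | solver/solutions/day_07/solve.py | count_hand_cards_and_sort
-- ===== SOURCE A (Python) =====
-- def count_hand_cards_and_sort(hand):
--   hand_parts_count = {}
--   hand_parts = [character for character in hand['hand']]
--   for part in hand_parts:
--     if part not in hand_parts_count:
--       hand_parts_count[part] = 1
--     else:
--       hand_parts_count[part] += 1
--
--   cards_raw_count = [hand_parts_count[key] for key in hand_parts_count]
--   cards_raw_count.sort(reverse=True)
--   return cards_raw_count
-- ===== SOURCE B (Python) =====
-- def count_hand_cards_and_sort(hand):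
--   cards = [character for character in hand['hand']]
--   counts = []
--   while cards:
--     card = cards[0]
--     counts.append(cards.count(card))
--     cards = [c for c in cards if c != card]
--   counts.sort(reverse=True)
--   return counts
-- ===== Notes on version B (the rewrite author's own statement) =====
-- stated objective: alternative
-- what changed: B keeps no frequency dictionary: it repeatedly takes the first remaining card, counts its occurrences with list.count, and filters all of them out, emitting one count per distinct card in first-occurrence order, then sorts descending as A does.
import Mathlib
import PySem

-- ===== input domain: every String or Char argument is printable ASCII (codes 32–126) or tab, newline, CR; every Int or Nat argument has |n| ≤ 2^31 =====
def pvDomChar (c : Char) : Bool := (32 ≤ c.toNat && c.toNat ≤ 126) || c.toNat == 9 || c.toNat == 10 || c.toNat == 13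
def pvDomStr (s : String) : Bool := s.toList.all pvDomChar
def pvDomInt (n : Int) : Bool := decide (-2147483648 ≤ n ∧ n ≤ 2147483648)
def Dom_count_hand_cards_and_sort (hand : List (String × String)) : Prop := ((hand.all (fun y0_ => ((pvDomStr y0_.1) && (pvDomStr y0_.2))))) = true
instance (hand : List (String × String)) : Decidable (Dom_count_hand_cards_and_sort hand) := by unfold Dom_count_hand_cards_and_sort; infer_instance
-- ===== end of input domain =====

-- B replaces A's frequency dictionary by repeated count-and-filter over the remaining cards (alternative decomposition, same result).


-- ===== PORT A =====
def count_hand_cards_and_sort (hand : List (String × String)) : List Int :=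
  match (PySem.Dict.ofList hand).get? "hand" with
  | none => []    -- KeyError in Python; excluded by Pre_
  | some s =>
    let hand_parts := s.toList
    let hand_parts_count :=
      hand_parts.foldl
        (fun d part =>
          if d.contains part = false then d.insert part 1
          else d.modify part 0 (fun v => v + 1))
        PySem.Dict.empty
    let cards_raw_count := hand_parts_count.values
    PySem.List.sorted cards_raw_count (fun x => x) true

-- ===== PORT B =====
-- the while loop of Source B: take the first remaining card, count it, filter it out
def bCardCounts : List Char → List Int
  | [] => []
  | card :: rest =>
    ((PySem.List.count (card :: rest) card : Nat) : Int) ::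
      bCardCounts ((card :: rest).filter (fun c => c ≠ card))
termination_by l => l.length
decreasing_by
  simp only [List.filter_cons]
  rw [if_neg (by simp)]
  exact Nat.lt_succ_of_le (List.length_filter_le _ _)

def count_hand_cards_and_sort_alt (hand : List (String × String)) : List Int :=
  match (PySem.Dict.ofList hand).get? "hand" with
  | none => []    -- KeyError in Python; excluded by Pre_
  | some s => PySem.List.sorted (bCardCounts s.toList) (fun x => x) true

-- ===== PRECONDITION & SPEC =====
-- Pre_ excludes exactly the dicts without the key 'hand', on which Python A raises KeyError (B raises it too).
def Pre_count_hand_cards_and_sort (hand : List (String × String)) : Prop :=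
  "hand" ∈ hand.map (·.1)
instance (hand : List (String × String)) : Decidable (Pre_count_hand_cards_and_sort hand) := by unfold Pre_count_hand_cards_and_sort; infer_instance
def pvWitness_count_hand_cards_and_sort : (List (String × String)) := [("hand", "AA233")]
def Spec_count_hand_cards_and_sort (hand : List (String × String)) (out : List Int) : Prop := out = count_hand_cards_and_sort_alt hand
instance (hand : List (String × String)) (out : List Int) : Decidable (Spec_count_hand_cards_and_sort hand out) := by unfold Spec_count_hand_cards_and_sort; infer_instance

-- ===== CLAIM (what is proved, stated in full; the proofs are below) =====
def Claim_equal_count_hand_cards_and_sort : Prop := ∀ (hand : List (String × String)), Dom_count_hand_cards_and_sort hand → Pre_count_hand_cards_and_sort hand → Spec_count_hand_cards_and_sort hand (count_hand_cards_and_sort hand)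

-- ===== LEMMAS AND PROOFS =====

-- A's insert-or-increment step is exactly the Counter step
lemma stepA_eq (d : PySem.Dict Char Int) (c : Char) :
    (if d.contains c = false then d.insert c 1 else d.modify c 0 (fun v => v + 1))
      = d.modify c 0 (fun v => v + 1) := by
  by_cases h : d.contains c = false
  · rw [if_pos h]
    simp [PySem.Dict.modify, PySem.Dict.getD_of_not_contains d 0 h]
  · rw [if_neg h]

lemma foldA_eq_counter (cs : List Char) :
    cs.foldl
      (fun d part =>
        if d.contains part = false then d.insert part 1
        else d.modify part 0 (fun v => v + 1))
      PySem.Dict.empty = PySem.Dict.counter cs := by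
  rw [show (fun (d : PySem.Dict Char Int) part =>
        if d.contains part = false then d.insert part 1
        else d.modify part 0 (fun v => v + 1))
      = (fun d part => d.modify part 0 (fun v => v + 1))
    from funext fun d => funext fun c => stepA_eq d c]
  rfl

lemma values_counter (cs : List Char) :
    (PySem.Dict.counter cs).values
      = (PySem.Set.ofList cs).map (fun k => (List.count k cs : Int)) := by
  show ((PySem.Dict.counter cs).items).map Prod.snd = _
  rw [PySem.Dict.items_counter]
  simp [List.map_map, Function.comp]

-- folding Set.add over a list ignores later copies of an element already present
lemma foldl_add_filter (c : Char) (l : List Char) : ∀ s : List Char, c ∈ s →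
    List.foldl PySem.Set.add s l = List.foldl PySem.Set.add s (l.filter (fun x => x ≠ c)) := by
  induction l with
  | nil => intro s _; rfl
  | cons x t ih =>
    intro s hc
    by_cases hx : x = c
    · subst hx
      have hadd : PySem.Set.add s x = s := by
        simp [PySem.Set.add, PySem.Set.contains, hc]
      simp only [List.filter_cons]
      rw [if_neg (by simp), List.foldl_cons, hadd]
      exact ih s hc
    · have hmem : c ∈ PySem.Set.add s x := (PySem.Set.mem_add s x c).mpr (Or.inl hc)
      simp only [List.filter_cons]
      rw [if_pos (by simp [hx]), List.foldl_cons, List.foldl_cons]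
      exact ih _ hmem

lemma foldl_add_cons (c : Char) (l : List Char) (h : c ∉ l) : ∀ s : List Char,
    List.foldl PySem.Set.add (c :: s) l = c :: List.foldl PySem.Set.add s l := by
  induction l with
  | nil => intro s; rfl
  | cons x t ih =>
    intro s
    have hcx : ¬ (c = x) := fun e => h (e ▸ List.mem_cons_self)
    have hkey : PySem.Set.contains (c :: s) x = PySem.Set.contains s x := by
      simp only [PySem.Set.contains, List.contains_cons]
      simp [show (x == c) = false from by simpa using fun e => hcx e.symm]
    have hstep : PySem.Set.add (c :: s) x = c :: PySem.Set.add s x := by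
      simp only [PySem.Set.add, hkey]
      split <;> simp
    rw [List.foldl_cons, hstep, List.foldl_cons]
    exact ih (fun hm => h (List.mem_cons_of_mem _ hm)) _

lemma ofList_cons (c : Char) (l : List Char) :
    PySem.Set.ofList (c :: l) = c :: PySem.Set.ofList (l.filter (fun x => x ≠ c)) := by
  have hnot : c ∉ l.filter (fun x => x ≠ c) := by
    intro hm
    have := List.of_mem_filter hm
    simp at this
  unfold PySem.Set.ofList
  rw [List.foldl_cons]
  have hadd : PySem.Set.add PySem.Set.empty c = [c] := rfl
  rw [hadd, foldl_add_filter c l [c] (List.mem_singleton.mpr rfl), foldl_add_cons c _ hnot []]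
  rfl

lemma bCardCounts_eq (l : List Char) :
    bCardCounts l = (PySem.Set.ofList l).map (fun k => (List.count k l : Int)) := by
  have H : ∀ n, ∀ l : List Char, l.length ≤ n →
      bCardCounts l = (PySem.Set.ofList l).map (fun k => (List.count k l : Int)) := by
    intro n
    induction n with
    | zero =>
      intro l hl
      have : l = [] := List.eq_nil_of_length_eq_zero (Nat.le_zero.mp hl)
      subst this
      simp only [bCardCounts]
      rfl
    | succ n ih =>
      intro l hl
      match l with
      | [] => simp only [bCardCounts]; rfl
      | c :: rest =>
        simp only [bCardCounts]
        have hfil : (c :: rest).filter (fun x => x ≠ c) = rest.filter (fun x => x ≠ c) := by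
          simp
        rw [hfil, ih _ (le_trans (List.length_filter_le _ _) (Nat.succ_le_succ_iff.mp hl))]
        rw [ofList_cons, List.map_cons]
        congr 1
        apply List.map_congr_left
        intro k hk
        have hkmem : k ∈ rest.filter (fun x => x ≠ c) := (PySem.Set.mem_ofList _ _).mp hk
        have hkc : k ≠ c := by simpa using List.of_mem_filter hkmem
        have h1 : List.count k (rest.filter (fun x => x ≠ c)) = List.count k rest :=
          List.count_filter (by simpa using hkc)
        rw [h1, List.count_cons]
        simp
        exact fun e => hkc (Eq.symm e)
  exact H l.length l le_rfl

-- ===== VERDICT (by name: the statement is the Claim_ definition above) =====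
theorem count_hand_cards_and_sort_spec : Claim_equal_count_hand_cards_and_sort := by
  intro hand _ _hpre
  unfold Spec_count_hand_cards_and_sort
  unfold count_hand_cards_and_sort count_hand_cards_and_sort_alt
  cases h : (PySem.Dict.ofList hand).get? "hand" with
  | none => rfl
  | some s =>
    simp only []
    rw [foldA_eq_counter, values_counter, ← bCardCounts_eq]
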